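-- pv_equiv track=rewrite | github.com/tokuhirom/sabos | scripts/apply-sysroot-patches.py | insert_before_line
-- ===== SOURCE A (Python) =====
-- def insert_before_line(content: str, target_line: str, insertion: str) -> str:
--     """content 内の target_line を含む行の直前に insertion を挿入する。
--     最初にマッチした箇所のみ。"""
--     lines = content.split("\n")
--     result = []
--     inserted = False
--     for line in lines:
--         if not inserted and target_line in line:
--             result.append(insertion)
--             inserted = True
--         result.append(line)
--     return "\n".join(result)
-- ===== SOURCE B (Python) =====
-- def insert_before_line(content: str, target_line: str, insertion: str) -> str:
--     """content 内の target_line を含む行の直前に insertion を挿入する。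
--     最初にマッチした箇所のみ。"""
--     lines = content.split("\n")
--     i = next((j for j, l in enumerate(lines) if target_line in l), None)
--     if i is not None:
--         lines[i:i] = [insertion]
--     return "\n".join(lines)
-- ===== Notes on version B (the rewrite author's own statement) =====
-- stated objective: simpler
-- what changed: Replaces the fused flag-driven accumulation loop with a locate-then-splice decomposition: find the index of the first matching line, splice the insertion in by slice assignment, join once.
import Mathlib
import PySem

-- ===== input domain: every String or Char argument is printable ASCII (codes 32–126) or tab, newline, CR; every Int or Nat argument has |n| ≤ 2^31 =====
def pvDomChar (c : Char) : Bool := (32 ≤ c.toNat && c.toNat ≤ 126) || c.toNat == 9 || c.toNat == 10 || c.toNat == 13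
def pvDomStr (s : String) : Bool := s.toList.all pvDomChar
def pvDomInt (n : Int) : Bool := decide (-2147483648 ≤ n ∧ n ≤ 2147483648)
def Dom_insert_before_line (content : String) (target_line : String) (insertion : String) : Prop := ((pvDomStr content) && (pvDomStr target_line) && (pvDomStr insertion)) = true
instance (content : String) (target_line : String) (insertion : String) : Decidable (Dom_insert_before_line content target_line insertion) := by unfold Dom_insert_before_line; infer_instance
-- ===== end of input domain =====

-- B replaces A's fused flag-driven accumulation loop with a locate-then-splice decomposition
-- (find the index of the first matching line, splice the insertion in, join once); same cost, simpler.

-- ===== PORT A =====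
-- literal port: split on '\n', one pass with (result, inserted) state, join
def insert_before_line (content : String) (target_line : String) (insertion : String) : String :=
  let lines := (PySem.Str.split? content "\n").getD []
  let st := lines.foldl
    (fun (st : List String × Bool) line =>
      if !st.2 && PySem.Str.isIn target_line line then
        ((st.1 ++ [insertion]) ++ [line], true)
      else
        (st.1 ++ [line], st.2))
    ([], false)
  PySem.Str.join "\n" st.1

-- ===== PORT B =====
-- literal port of Source B: find the first matching index, splice, join
def insert_before_line_alt (content : String) (target_line : String) (insertion : String) : String :=
  let lines := (PySem.Str.split? content "\n").getD []
  let lines' :=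
    match lines.findIdx? (fun l => PySem.Str.isIn target_line l) with
    | some i => lines.take i ++ insertion :: lines.drop i
    | none => lines
  PySem.Str.join "\n" lines'

-- ===== PRECONDITION & SPEC =====
def Spec_insert_before_line (content : String) (target_line : String) (insertion : String) (out : String) : Prop := out = insert_before_line_alt content target_line insertion
instance (content : String) (target_line : String) (insertion : String) (out : String) : Decidable (Spec_insert_before_line content target_line insertion out) := by unfold Spec_insert_before_line; infer_instance

-- ===== CLAIM (what is proved, stated in full; the proofs are below) =====
def Claim_equal_insert_before_line : Prop := ∀ (content : String) (target_line : String) (insertion : String), Dom_insert_before_line content target_line insertion → Spec_insert_before_line content target_line insertion (insert_before_line content target_line insertion)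

-- ===== LEMMAS AND PROOFS =====

-- once the flag is set, A's loop only appends the remaining lines
theorem foldl_flag_true (ins : String) (p : String → Bool) (lines : List String)
    (acc : List String) :
    lines.foldl
      (fun (st : List String × Bool) line =>
        if !st.2 && p line then ((st.1 ++ [ins]) ++ [line], true)
        else (st.1 ++ [line], st.2))
      (acc, true)
    = (acc ++ lines, true) := by
  induction lines generalizing acc with
  | nil => simp
  | cons a l ih =>
    simp only [List.foldl_cons, Bool.not_true, Bool.false_and, Bool.false_eq_true, if_false]
    rw [ih]
    simp

-- A's whole loop result = B's locate-then-splice result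
theorem foldl_flag_false (ins : String) (p : String → Bool) (lines : List String)
    (acc : List String) :
    (lines.foldl
      (fun (st : List String × Bool) line =>
        if !st.2 && p line then ((st.1 ++ [ins]) ++ [line], true)
        else (st.1 ++ [line], st.2))
      (acc, false)).1
    = acc ++ (match lines.findIdx? p with
              | some i => lines.take i ++ ins :: lines.drop i
              | none => lines) := by
  induction lines generalizing acc with
  | nil => simp
  | cons a l ih =>
    simp only [List.foldl_cons, Bool.not_false, Bool.true_and, List.findIdx?_cons]
    by_cases h : p a
    · rw [if_pos h, if_pos h, foldl_flag_true]
      simp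
    · rw [if_neg h, if_neg h, ih]
      cases hfi : l.findIdx? p <;> simp

-- ===== VERDICT (by name: the statement is the Claim_ definition above) =====
theorem insert_before_line_spec : Claim_equal_insert_before_line := by
  intro content target_line insertion _
  unfold Spec_insert_before_line insert_before_line insert_before_line_alt
  simp only [foldl_flag_false, List.nil_append]
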